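-- pv_equiv track=rewrite | github.com/illinoistech-itm/py-mgipsim | build_anomaly_dataset.py | parse_docstring
-- ===== SOURCE A (Python) =====
-- from typing import Any, Dict, List, Tuple, Optional
--
-- def parse_docstring(doc: Optional[str], fallback_id: str) -> Tuple[str, str, str, str, str, str]:
--     """
--     Parse a function docstring that follows the pattern:
--
--         ad_XX: <question text>
--         Answer_generation_rule: ...
--         Metric: ...
--         Answer_type: ...
--         Answer_instruction: ...
--
--     Returns:
--         (qid, qtext, rule, metric, answer_type, answer_instruction)
--     """
--     if not doc:
--         return fallback_id, "", "", "", "", ""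
--
--     qid = fallback_id
--     qtext = ""
--     rule = ""
--     metric = ""
--     answer_type = ""
--     answer_instruction = ""
--
--     for raw in doc.strip().splitlines():
--         line = raw.strip()
--         lower = line.lower()
--         if lower.startswith("ad_") and ":" in line:
--             parts = line.split(":", 1)
--             qid = parts[0].strip()
--             qtext = parts[1].strip()
--         elif lower.startswith("answer_generation_rule:"):
--             rule = line.split(":", 1)[1].strip()
--         elif lower.startswith("metric:"):
--             metric = line.split(":", 1)[1].strip()
--         elif lower.startswith("answer_type:"):
--             answer_type = line.split(":", 1)[1].strip()
--         elif lower.startswith("answer_instruction:"):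
--             answer_instruction = line.split(":", 1)[1].strip()
--
--     return qid, qtext, rule, metric, answer_type, answer_instruction
-- ===== SOURCE B (Python) =====
-- # Staged re-implementation: instead of one forward pass with six accumulators,
-- # strip the lines once, then answer each field independently by scanning the
-- # lines in REVERSE for the first (i.e. last overall) line matching that field's
-- # prefix. Correct because A's elif branches are mutually exclusive (the five
-- # prefixes are pairwise prefix-incompatible), so each field only depends on the
-- # last line matching its own predicate.
-- def parse_docstring(doc, fallback_id):
--     if not doc:
--         return fallback_id, "", "", "", "", ""
--
--     lines = [raw.strip() for raw in doc.strip().splitlines()]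
--
--     def last_match(pred):
--         for line in reversed(lines):
--             if pred(line):
--                 return line
--         return None
--
--     ad = last_match(lambda l: l.lower().startswith("ad_") and ":" in l)
--     if ad is None:
--         qid, qtext = fallback_id, ""
--     else:
--         parts = ad.split(":", 1)
--         qid, qtext = parts[0].strip(), parts[1].strip()
--
--     def field(prefix):
--         m = last_match(lambda l: l.lower().startswith(prefix))
--         return "" if m is None else m.split(":", 1)[1].strip()
--
--     return (qid, qtext, field("answer_generation_rule:"), field("metric:"),
--             field("answer_type:"), field("answer_instruction:"))
-- ===== Notes on version B (the rewrite author's own statement) =====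
-- stated objective: alternative
-- what changed: Replaces A's single forward pass carrying six accumulator variables through an if/elif chain by staged per-field reverse scans: each of the six fields is answered independently by the first matching line found scanning the stripped lines backwards (last-wins), valid because the five prefixes are mutually exclusive.
import Mathlib
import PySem

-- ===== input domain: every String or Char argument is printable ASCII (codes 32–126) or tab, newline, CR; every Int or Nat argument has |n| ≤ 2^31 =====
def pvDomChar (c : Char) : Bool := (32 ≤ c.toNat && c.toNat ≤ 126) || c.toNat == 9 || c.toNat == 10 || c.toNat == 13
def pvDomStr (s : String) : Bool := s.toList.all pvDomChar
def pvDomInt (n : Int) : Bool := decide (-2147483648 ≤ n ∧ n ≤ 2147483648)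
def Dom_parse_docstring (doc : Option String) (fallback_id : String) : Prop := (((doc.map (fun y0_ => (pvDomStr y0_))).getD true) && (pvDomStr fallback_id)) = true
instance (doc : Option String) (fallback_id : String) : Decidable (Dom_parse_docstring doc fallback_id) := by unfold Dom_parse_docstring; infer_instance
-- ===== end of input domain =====

-- B replaces A's single forward pass with six accumulators by independent per-field
-- reverse scans (last matching line wins); alternative decomposition, same cost.

-- shared tiny extraction helpers: line.split(":", 1)[k].strip()
def pvHead (line : String) : String :=
  PySem.Str.strip ((PySem.List.pyGet? ((PySem.Str.splitMax? line ":" 1).getD []) 0).getD "")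
def pvTail (line : String) : String :=
  PySem.Str.strip ((PySem.List.pyGet? ((PySem.Str.splitMax? line ":" 1).getD []) 1).getD "")

-- branch predicates (lower().startswith tests, shared by both ports)
def adP (line : String) : Bool :=
  PySem.Str.startswith (PySem.Str.lower line) "ad_" && PySem.Str.isIn ":" line
def preP (pre : String) (line : String) : Bool :=
  PySem.Str.startswith (PySem.Str.lower line) pre

-- ===== PORT A =====
def pvStepA (st : String × String × String × String × String × String) (raw : String) :
    String × String × String × String × String × String :=
  let line := PySem.Str.strip raw
  let (qid, qtext, rule, metric, atype, ainstr) := st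
  if adP line then
    (pvHead line, pvTail line, rule, metric, atype, ainstr)
  else if preP "answer_generation_rule:" line then
    (qid, qtext, pvTail line, metric, atype, ainstr)
  else if preP "metric:" line then
    (qid, qtext, rule, pvTail line, atype, ainstr)
  else if preP "answer_type:" line then
    (qid, qtext, rule, metric, pvTail line, ainstr)
  else if preP "answer_instruction:" line then
    (qid, qtext, rule, metric, atype, pvTail line)
  else
    (qid, qtext, rule, metric, atype, ainstr)

def parse_docstring (doc : Option String) (fallback_id : String) :
    String × String × String × String × String × String :=
  match doc with
  | none => (fallback_id, "", "", "", "", "")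
  | some d =>
    if d = "" then (fallback_id, "", "", "", "", "")
    else
      (PySem.Str.splitlines (PySem.Str.strip d)).foldl pvStepA
        (fallback_id, "", "", "", "", "")

-- ===== PORT B =====
-- the 'for line in reversed(lines): if pred(line): return line' helper
def pvLastMatch (lines : List String) (p : String → Bool) : Option String :=
  lines.reverse.find? p

def pvField (lines : List String) (pre : String) : String :=
  match pvLastMatch lines (preP pre) with
  | some l => pvTail l
  | none => ""

def parse_docstring_alt (doc : Option String) (fallback_id : String) :
    String × String × String × String × String × String :=
  match doc with
  | none => (fallback_id, "", "", "", "", "")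
  | some d =>
    if d = "" then (fallback_id, "", "", "", "", "")
    else
      let lines := (PySem.Str.splitlines (PySem.Str.strip d)).map PySem.Str.strip
      let (qid, qtext) :=
        match pvLastMatch lines adP with
        | some l => (pvHead l, pvTail l)
        | none => (fallback_id, "")
      (qid, qtext, pvField lines "answer_generation_rule:", pvField lines "metric:",
       pvField lines "answer_type:", pvField lines "answer_instruction:")

-- ===== PRECONDITION & SPEC =====
def Spec_parse_docstring (doc : Option String) (fallback_id : String) (out : String × String × String × String × String × String) : Prop := out = parse_docstring_alt doc fallback_id
instance (doc : Option String) (fallback_id : String) (out : String × String × String × String × String × String) : Decidable (Spec_parse_docstring doc fallback_id out) := by unfold Spec_parse_docstring; infer_instance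

-- ===== CLAIM (what is proved, stated in full; the proofs are below) =====
def Claim_equal_parse_docstring : Prop := ∀ (doc : Option String) (fallback_id : String), Dom_parse_docstring doc fallback_id → Spec_parse_docstring doc fallback_id (parse_docstring doc fallback_id)

-- ===== LEMMAS AND PROOFS =====

-- two distinct literal prefixes of the same string must be comparable
theorem pv_excl {s p q : String}
    (h : PySem.Str.startswith s p = true)
    (h1 : ¬ p.toList <+: q.toList) (h2 : ¬ q.toList <+: p.toList) :
    PySem.Str.startswith s q = false := by
  rw [PySem.Str.startswith_eq] at h ⊢
  rw [PySem.Chars.startswith_iff] at h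
  rw [← Bool.not_eq_true, PySem.Chars.startswith_iff]
  intro hq
  rcases List.prefix_or_prefix_of_prefix h hq with hc | hc
  · exact h1 hc
  · exact h2 hc

-- the characterization of A's fold: each component is determined by the last
-- line (scanning backwards: the first in the reversed stripped list) matching
-- its own predicate
set_option maxHeartbeats 2000000 in
theorem pvFoldChar (raws : List String) (q t r m ty i : String) :
    raws.foldl pvStepA (q, t, r, m, ty, i) =
      (let L := (raws.map PySem.Str.strip).reverse
       ((match L.find? adP with | some l => pvHead l | none => q),
        (match L.find? adP with | some l => pvTail l | none => t),
        (match L.find? (preP "answer_generation_rule:") with | some l => pvTail l | none => r),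
        (match L.find? (preP "metric:") with | some l => pvTail l | none => m),
        (match L.find? (preP "answer_type:") with | some l => pvTail l | none => ty),
        (match L.find? (preP "answer_instruction:") with | some l => pvTail l | none => i))) := by
  induction raws using List.reverseRecOn with
  | nil => rfl
  | append_singleton rs x ih =>
    simp only [List.foldl_append, List.foldl_cons, List.foldl_nil, ih,
      List.map_append, List.map_cons, List.map_nil, List.reverse_append,
      List.reverse_cons, List.reverse_nil, List.nil_append, List.cons_append]
    by_cases hAd : adP (PySem.Str.strip x) = true
    · have hsw : PySem.Str.startswith (PySem.Str.lower (PySem.Str.strip x)) "ad_" = true :=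
        (Bool.and_eq_true _ _ ▸ hAd).1
      have e1 : preP "answer_generation_rule:" (PySem.Str.strip x) = false :=
        pv_excl hsw (by decide) (by decide)
      have e2 : preP "metric:" (PySem.Str.strip x) = false := pv_excl hsw (by decide) (by decide)
      have e3 : preP "answer_type:" (PySem.Str.strip x) = false := pv_excl hsw (by decide) (by decide)
      have e4 : preP "answer_instruction:" (PySem.Str.strip x) = false := pv_excl hsw (by decide) (by decide)
      rw [List.find?_cons_of_pos hAd, List.find?_cons_of_neg (by simp [e1]),
        List.find?_cons_of_neg (by simp [e2]), List.find?_cons_of_neg (by simp [e3]),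
        List.find?_cons_of_neg (by simp [e4])]
      simp [pvStepA, hAd]
    · by_cases h1 : preP "answer_generation_rule:" (PySem.Str.strip x) = true
      · have hsw : PySem.Str.startswith (PySem.Str.lower (PySem.Str.strip x)) "answer_generation_rule:" = true := h1
        have e2 : preP "metric:" (PySem.Str.strip x) = false := pv_excl hsw (by decide) (by decide)
        have e3 : preP "answer_type:" (PySem.Str.strip x) = false := pv_excl hsw (by decide) (by decide)
        have e4 : preP "answer_instruction:" (PySem.Str.strip x) = false := pv_excl hsw (by decide) (by decide)
        rw [List.find?_cons_of_neg hAd, List.find?_cons_of_pos h1,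
          List.find?_cons_of_neg (by simp [e2]), List.find?_cons_of_neg (by simp [e3]),
          List.find?_cons_of_neg (by simp [e4])]
        simp [pvStepA, hAd, h1]
      · by_cases h2 : preP "metric:" (PySem.Str.strip x) = true
        · have hsw : PySem.Str.startswith (PySem.Str.lower (PySem.Str.strip x)) "metric:" = true := h2
          have e3 : preP "answer_type:" (PySem.Str.strip x) = false := pv_excl hsw (by decide) (by decide)
          have e4 : preP "answer_instruction:" (PySem.Str.strip x) = false := pv_excl hsw (by decide) (by decide)
          rw [List.find?_cons_of_neg hAd, List.find?_cons_of_neg h1,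
            List.find?_cons_of_pos h2, List.find?_cons_of_neg (by simp [e3]),
            List.find?_cons_of_neg (by simp [e4])]
          simp [pvStepA, hAd, h1, h2]
        · by_cases h3 : preP "answer_type:" (PySem.Str.strip x) = true
          · have hsw : PySem.Str.startswith (PySem.Str.lower (PySem.Str.strip x)) "answer_type:" = true := h3
            have e4 : preP "answer_instruction:" (PySem.Str.strip x) = false := pv_excl hsw (by decide) (by decide)
            rw [List.find?_cons_of_neg hAd, List.find?_cons_of_neg h1,
              List.find?_cons_of_neg h2, List.find?_cons_of_pos h3,
              List.find?_cons_of_neg (by simp [e4])]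
            simp [pvStepA, hAd, h1, h2, h3]
          · by_cases h4 : preP "answer_instruction:" (PySem.Str.strip x) = true
            · rw [List.find?_cons_of_neg hAd, List.find?_cons_of_neg h1,
                List.find?_cons_of_neg h2, List.find?_cons_of_neg h3,
                List.find?_cons_of_pos h4]
              simp [pvStepA, hAd, h1, h2, h3, h4]
            · rw [List.find?_cons_of_neg hAd, List.find?_cons_of_neg h1,
                List.find?_cons_of_neg h2, List.find?_cons_of_neg h3,
                List.find?_cons_of_neg h4]
              simp [pvStepA, hAd, h1, h2, h3, h4]

-- ===== VERDICT (by name: the statement is the Claim_ definition above) =====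
theorem parse_docstring_spec : Claim_equal_parse_docstring := by
  intro doc fallback_id _
  unfold Spec_parse_docstring parse_docstring parse_docstring_alt
  cases doc with
  | none => rfl
  | some d =>
    dsimp only
    split_ifs with h
    · rfl
    · rw [pvFoldChar]
      simp only [pvField, pvLastMatch]
      cases ((PySem.Str.splitlines (PySem.Str.strip d)).map PySem.Str.strip).reverse.find? adP <;>
        rfl
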